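-- pv_equiv track=rewrite | github.com/pypi-data/pypi-mirror-395 | packages/rdetoolkit/rdetoolkit-1.4.3-cp314-cp314-win32.whl/rdetoolkit/graph/textutils.py | _split_unit
-- ===== SOURCE A (Python) =====
-- def _split_unit(text: str) -> tuple[str, str | None]:
--     """Remove a trailing parenthesized unit if present."""
--     _text = text.strip()
--     if not _text or _text[-1] != ')':
--         return _text, None
--
--     depth = 0
--     for i in range(len(_text) - 1, -1, -1):
--         ch = _text[i]
--         if ch == ')':
--             depth += 1
--         elif ch == '(':
--             depth -= 1
--             if depth == 0:
--                 unit = _text[i + 1 : -1]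
--                 return _text[:i].rstrip(), unit or None
--     return _text, None
-- ===== SOURCE B (Python) =====
-- def _split_unit(text: str) -> tuple[str, str | None]:
--     """Remove a trailing parenthesized unit if present (forward balance scan)."""
--     _text = text.strip()
--     if not _text or _text[-1] != ')':
--         return _text, None
--
--     # total balance of the whole string: closes minus opens
--     total = 0
--     for ch in _text:
--         if ch == ')':
--             total += 1
--         elif ch == '(':
--             total -= 1
--
--     # forward pass: the '(' matching the final ')' is the LAST index i with
--     # _text[i] == '(' whose prefix balance equals total
--     pre = 0
--     best = None
--     for i, ch in enumerate(_text):
--         if ch == '(':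
--             if pre == total:
--                 best = i
--             pre -= 1
--         elif ch == ')':
--             pre += 1
--     if best is None:
--         return _text, None
--     return _text[:best].rstrip(), _text[best + 1 : -1] or None
-- ===== Notes on version B (the rewrite author's own statement) =====
-- stated objective: alternative
-- what changed: Replaces A's backward depth-counting scan with early return by a forward scan: B precomputes the total parenthesis balance of the stripped string, then tracks the prefix balance left-to-right and keeps the last open-paren index whose prefix balance equals the total, which is exactly the one matching the trailing close-paren.
import Mathlib
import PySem

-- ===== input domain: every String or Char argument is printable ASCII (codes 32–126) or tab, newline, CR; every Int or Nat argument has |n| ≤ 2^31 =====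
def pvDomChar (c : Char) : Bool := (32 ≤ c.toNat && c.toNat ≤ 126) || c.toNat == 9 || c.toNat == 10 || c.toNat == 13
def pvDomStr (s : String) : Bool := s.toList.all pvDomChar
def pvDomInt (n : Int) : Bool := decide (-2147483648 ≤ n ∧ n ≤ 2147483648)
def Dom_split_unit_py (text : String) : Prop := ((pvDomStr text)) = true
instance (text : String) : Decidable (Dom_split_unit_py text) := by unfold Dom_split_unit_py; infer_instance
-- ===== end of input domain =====

-- B replaces A's backward depth-counting scan by a forward balance scan (precomputed total
-- balance + prefix balance, keeping the last open paren matching the trailing close paren);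
-- objective: alternative algorithm, same asymptotic cost.


-- ===== PORT A =====
-- A's backward for-loop 'for i in range(len(_text)-1, -1, -1)' with its depth counter and
-- early return: structural recursion on the index i, falling off the front returns none.
def pvAFind (cs : List Char) : Nat → Int → Option Nat
  | 0, depth =>
      let ch := cs.getD 0 ' '
      if ch = ')' then none
      else if ch = '(' then (if depth - 1 = 0 then some 0 else none)
      else none
  | (i+1), depth =>
      let ch := cs.getD (i+1) ' '
      if ch = ')' then pvAFind cs i (depth + 1)
      else if ch = '(' then
        (if depth - 1 = 0 then some (i+1) else pvAFind cs i (depth - 1))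
      else pvAFind cs i depth

def split_unit_py (text : String) : String × Option String :=
  let t := PySem.Chars.strip text.toList
  if t = [] then (String.ofList t, none)
  else if ¬ (PySem.List.pyGet? t (-1) = some ')') then (String.ofList t, none)
  else
    match pvAFind t (t.length - 1) 0 with
    | some i =>
        let unit := PySem.Chars.slice t (some ((i : Int) + 1)) (some (-1))
        (String.ofList (PySem.Chars.rstrip (PySem.Chars.slice t none (some (i : Int)))),
         if unit = [] then none else some (String.ofList unit))
    | none => (String.ofList t, none)

-- ===== PORT B =====
-- Source B's first loop: total balance (closes minus opens) of the whole string.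
def pvBTotal (cs : List Char) : Int :=
  cs.foldl (fun total ch => if ch = ')' then total + 1 else if ch = '(' then total - 1 else total) 0

-- Source B's second loop body: state (pre, best), scanning (index, char) pairs forward.
def pvBStep (total : Int) (s : Int × Option Int) (p : Int × Char) : Int × Option Int :=
  if p.2 = '(' then (s.1 - 1, if s.1 = total then some p.1 else s.2)
  else if p.2 = ')' then (s.1 + 1, s.2)
  else s

def split_unit_py_alt (text : String) : String × Option String :=
  let t := PySem.Chars.strip text.toList
  if t = [] then (String.ofList t, none)
  else if ¬ (PySem.List.pyGet? t (-1) = some ')') then (String.ofList t, none)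
  else
    let total := pvBTotal t
    match ((PySem.List.enumerate t 0).foldl (pvBStep total) (0, none)).2 with
    | some i =>
        let unit := PySem.Chars.slice t (some (i + 1)) (some (-1))
        (String.ofList (PySem.Chars.rstrip (PySem.Chars.slice t none (some i))),
         if unit = [] then none else some (String.ofList unit))
    | none => (String.ofList t, none)

-- ===== PRECONDITION & SPEC =====
def Spec_split_unit_py (text : String) (out : String × Option String) : Prop := out = split_unit_py_alt text
instance (text : String) (out : String × Option String) : Decidable (Spec_split_unit_py text out) := by unfold Spec_split_unit_py; infer_instance

-- ===== CLAIM (what is proved, stated in full; the proofs are below) =====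
def Claim_equal_split_unit_py : Prop := ∀ (text : String), Dom_split_unit_py text → Spec_split_unit_py text (split_unit_py text)

-- ===== LEMMAS AND PROOFS =====

-- suffix balance: closes minus opens of cs[k:]
def pvSufBal (t : List Char) (k : Nat) : Int :=
  ((t.drop k).count ')' : Int) - ((t.drop k).count '(' : Int)

-- the '(' matching the final ')': an index whose suffix balance is 0
def pvPred (t : List Char) (j : Nat) : Bool :=
  (t.getD j ' ' == '(') && (pvSufBal t j == 0)

lemma pvSufBal_step (t : List Char) (k : Nat) (h : k < t.length) :
    pvSufBal t k = (if t[k] = ')' then 1 else if t[k] = '(' then -1 else 0) + pvSufBal t (k+1) := by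
  unfold pvSufBal
  rw [List.drop_eq_getElem_cons h, List.count_cons, List.count_cons]
  by_cases h1 : t[k] = ')' <;> by_cases h2 : t[k] = '(' <;> simp [h1, h2] <;> push_cast <;> ring

lemma pvSufBal_close (t : List Char) (k : Nat) (hk : k < t.length) (h : t[k] = ')') :
    pvSufBal t k = 1 + pvSufBal t (k+1) := by
  rw [pvSufBal_step t k hk, h]; simp

lemma pvSufBal_open (t : List Char) (k : Nat) (hk : k < t.length) (h : t[k] = '(') :
    pvSufBal t k = -1 + pvSufBal t (k+1) := by
  rw [pvSufBal_step t k hk, h]; simp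

lemma pvSufBal_other (t : List Char) (k : Nat) (hk : k < t.length)
    (h1 : ¬ t[k] = ')') (h2 : ¬ t[k] = '(') : pvSufBal t k = pvSufBal t (k+1) := by
  rw [pvSufBal_step t k hk]; simp [h1, h2]

lemma pvSufBal_last (t : List Char) : pvSufBal t t.length = 0 := by
  simp [pvSufBal]

lemma pvPred_char (t : List Char) (j : Nat) (hj : j < t.length) :
    pvPred t j = ((t[j] == '(') && (pvSufBal t j == 0)) := by
  unfold pvPred
  rw [List.getD_eq_getElem t ' ' hj]

lemma pvBTotal_go (l : List Char) :
    ∀ a : Int,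
      l.foldl (fun total ch => if ch = ')' then total + 1 else if ch = '(' then total - 1 else total) a
        = a + ((l.count ')' : Int) - (l.count '(' : Int)) := by
  induction l with
  | nil => intro a; simp
  | cons c l ih =>
      intro a
      rw [List.foldl_cons, ih, List.count_cons, List.count_cons]
      by_cases h1 : c = ')' <;> by_cases h2 : c = '(' <;> simp [h1, h2] <;> push_cast <;> ring

lemma pvBTotal_eq (t : List Char) : pvBTotal t = pvSufBal t 0 := by
  unfold pvBTotal pvSufBal
  rw [pvBTotal_go]
  simp

lemma pvAFind_eq (t : List Char) :
    ∀ i : Nat, i < t.length →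
      pvAFind t i (pvSufBal t (i+1)) = ((List.range (i+1)).reverse).find? (pvPred t) := by
  intro i
  induction i with
  | zero =>
      intro h
      have hg : t.getD 0 ' ' = t[0] := List.getD_eq_getElem t ' ' h
      have hr : (List.range 1).reverse = [0] := by decide
      have hfind : ((List.range 1).reverse).find? (pvPred t) = if pvPred t 0 then some 0 else none := by
        rw [hr]; cases hp : pvPred t 0 <;> simp [List.find?, hp]
      rw [hfind, pvAFind]
      simp only [hg, pvPred_char t 0 h]
      by_cases h1 : t[0] = ')'
      · simp [h1]
      · by_cases h2 : t[0] = '('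
        · have hb := pvSufBal_open t 0 h h2
          by_cases hz : pvSufBal t 0 = 0
          · rw [if_neg h1, if_pos h2, if_pos (by omega)]
            simp [h2, hz]
          · rw [if_neg h1, if_pos h2, if_neg (by omega)]
            simp [h2, hz]
        · simp [h1, h2]
  | succ i ih =>
      intro h
      have hi : i < t.length := by omega
      have hg : t.getD (i+1) ' ' = t[i+1] := List.getD_eq_getElem t ' ' h
      have hfind : ((List.range (i+1+1)).reverse).find? (pvPred t)
          = if pvPred t (i+1) then some (i+1) else ((List.range (i+1)).reverse).find? (pvPred t) := by
        rw [List.range_succ, List.reverse_append, List.reverse_singleton, List.singleton_append,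
          List.find?_cons]
        cases hp : pvPred t (i+1) <;> simp [hp]
      rw [hfind, pvAFind]
      simp only [hg]
      by_cases h1 : t[i+1] = ')'
      · have hb := pvSufBal_close t (i+1) h h1
        rw [if_pos h1, if_neg (by simp [pvPred_char t (i+1) h, h1])]
        rw [show pvSufBal t (i+1+1) + 1 = pvSufBal t (i+1) by omega]
        exact ih hi
      · by_cases h2 : t[i+1] = '('
        · have hb := pvSufBal_open t (i+1) h h2
          by_cases hz : pvSufBal t (i+1) = 0
          · rw [if_neg h1, if_pos h2, if_pos (by omega),
              if_pos (by simp [pvPred_char t (i+1) h, h2, hz])]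
          · rw [if_neg h1, if_pos h2, if_neg (by omega),
              if_neg (by simp [pvPred_char t (i+1) h, h2, hz]),
              show pvSufBal t (i+1+1) - 1 = pvSufBal t (i+1) by omega]
            exact ih hi
        · have hb := pvSufBal_other t (i+1) h h1 h2
          rw [if_neg h1, if_neg h2, if_neg (by simp [pvPred_char t (i+1) h, h2]),
            show pvSufBal t (i+1+1) = pvSufBal t (i+1) by omega]
          exact ih hi

lemma pvFoldB (t : List Char) (total : Int) :
    ∀ (s : List Char) (k : Nat) (pre : Int) (best : Option Int),
      t.drop k = s → pre = total - pvSufBal t k →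
      ((PySem.List.enumerate s (k : Int)).foldl (pvBStep total) (pre, best)).2
        = Option.or ((((List.range' k s.length).reverse).find? (pvPred t)).map (fun j => (j : Int))) best := by
  intro s
  induction s with
  | nil =>
      intro k pre best h1 h2
      simp [PySem.List.enumerate_nil]
  | cons c s' ih =>
      intro k pre best h1 h2
      have hk : k < t.length := by
        by_contra hk
        have hd : t.drop k = [] := List.drop_eq_nil_of_le (by omega)
        rw [h1] at hd
        simp at hd
      have hcons : c :: s' = t[k] :: t.drop (k+1) := by
        rw [← h1, List.drop_eq_getElem_cons hk]
      have hc : t[k] = c := ((List.cons.injEq _ _ _ _).mp hcons).1.symm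
      have hs' : t.drop (k+1) = s' := ((List.cons.injEq _ _ _ _).mp hcons).2.symm
      have hpk : pvPred t k = ((c == '(') && (pvSufBal t k == 0)) := by
        rw [pvPred_char t k hk, hc]
      rw [PySem.List.enumerate_cons, List.foldl_cons,
        show (k : Int) + 1 = ((k+1 : Nat) : Int) by push_cast; ring,
        show (c :: s').length = s'.length + 1 from rfl, List.range'_succ,
        List.reverse_cons, List.find?_append]
      by_cases hcp : c = '('
      · have hb := pvSufBal_open t k hk (hc.trans hcp ▸ by rw [hc, hcp])
        have hstep : pvBStep total (pre, best) ((k : Int), c) =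
            (pre - 1, if pre = total then some (k : Int) else best) := by
          simp [pvBStep, hcp]
        rw [hstep, ih (k+1) (pre - 1) _ hs' (by omega)]
        by_cases hz : pvSufBal t k = 0
        · have hpred : pvPred t k = true := by rw [hpk]; simp [hcp, hz]
          rw [if_pos (by omega)]
          cases hf : ((List.range' (k+1) s'.length).reverse).find? (pvPred t) <;>
            simp [hf, hpred, List.find?]
        · have hpred : pvPred t k = false := by rw [hpk]; simp [hz]
          rw [if_neg (by omega)]
          cases hf : ((List.range' (k+1) s'.length).reverse).find? (pvPred t) <;>
            simp [hf, hpred, List.find?]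
      · by_cases hcq : c = ')'
        · have hb := pvSufBal_close t k hk (by rw [hc, hcq])
          have hstep : pvBStep total (pre, best) ((k : Int), c) = (pre + 1, best) := by
            simp [pvBStep, hcp, hcq]
          have hpred : pvPred t k = false := by rw [hpk]; simp [hcp]
          rw [hstep, ih (k+1) (pre + 1) best hs' (by omega)]
          cases hf : ((List.range' (k+1) s'.length).reverse).find? (pvPred t) <;>
            simp [hf, hpred, List.find?]
        · have hb := pvSufBal_other t k hk (by rw [hc]; exact hcq) (by rw [hc]; exact hcp)
          have hstep : pvBStep total (pre, best) ((k : Int), c) = (pre, best) := by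
            simp [pvBStep, hcp, hcq]
          have hpred : pvPred t k = false := by rw [hpk]; simp [hcp]
          rw [hstep, ih (k+1) pre best hs' (by omega)]
          cases hf : ((List.range' (k+1) s'.length).reverse).find? (pvPred t) <;>
            simp [hf, hpred, List.find?]

-- ===== VERDICT (by name: the statement is the Claim_ definition above) =====
theorem split_unit_py_spec : Claim_equal_split_unit_py := by
  intro text _
  show split_unit_py text = split_unit_py_alt text
  unfold split_unit_py split_unit_py_alt
  set t := PySem.Chars.strip text.toList with ht
  by_cases h0 : t = []
  · simp [h0]
  · rw [if_neg h0, if_neg h0]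
    by_cases h1 : PySem.List.pyGet? t (-1) = some ')'
    · rw [if_neg (by simpa using h1), if_neg (by simpa using h1)]
      have hn : 0 < t.length := List.length_pos_iff.mpr h0
      have hA : pvAFind t (t.length - 1) 0 = ((List.range t.length).reverse).find? (pvPred t) := by
        have hx := pvAFind_eq t (t.length - 1) (by omega)
        rwa [Nat.sub_add_cancel hn, pvSufBal_last] at hx
      have hB : ((PySem.List.enumerate t ((0:Nat) : Int)).foldl (pvBStep (pvBTotal t)) (0, none)).2
          = (((List.range t.length).reverse).find? (pvPred t)).map (fun j => (j : Int)) := by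
        have hy := pvFoldB t (pvBTotal t) t 0 0 none (by simp) (by rw [pvBTotal_eq]; ring)
        rw [List.range_eq_range']
        simpa using hy
      simp only [Nat.cast_zero] at hB
      simp only [hA, hB]
      cases hf : ((List.range t.length).reverse).find? (pvPred t) with
      | none => simp
      | some j => simp
    · rw [if_pos (by simpa using h1), if_pos (by simpa using h1)]
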